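-- pv_equiv track=rewrite | github.com/patell11/DataStructuresAndAlgorithms_SanDiego | Practice/Coursera_Problems/maximum_number_of_prizes.py | maximum_num_prizes_naive
-- ===== SOURCE A (Python) =====
-- def maximum_num_prizes_naive(n):
--     summands = []
--
--     for i in range(1, n+1):
--         summands.append(i)
--         remaining = n - sum(summands)
--         if sum(summands) > n or (remaining in summands):
--             summands.pop()
--     return summands
-- ===== SOURCE B (Python) =====
-- def maximum_num_prizes_naive(n):
--     # Greedy distinct-summand decomposition via triangular numbers:
--     # find the largest k with 1+2+...+k <= n; the answer is 1..k-1 plus the rest.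
--     k, total = 0, 0
--     while total + k + 1 <= n:
--         k += 1
--         total += k
--     if k == 0:
--         return []
--     return list(range(1, k)) + [n - k * (k - 1) // 2]
-- ===== Notes on version B (the rewrite author's own statement) =====
-- stated objective: faster
-- what changed: A scans every candidate up to n, recomputing sum(summands) and an inner list-membership scan at each step; B finds the largest k whose triangular number stays below n with a running-total while loop and returns the consecutive prefix plus a closed-form remainder.
import Mathlib
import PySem

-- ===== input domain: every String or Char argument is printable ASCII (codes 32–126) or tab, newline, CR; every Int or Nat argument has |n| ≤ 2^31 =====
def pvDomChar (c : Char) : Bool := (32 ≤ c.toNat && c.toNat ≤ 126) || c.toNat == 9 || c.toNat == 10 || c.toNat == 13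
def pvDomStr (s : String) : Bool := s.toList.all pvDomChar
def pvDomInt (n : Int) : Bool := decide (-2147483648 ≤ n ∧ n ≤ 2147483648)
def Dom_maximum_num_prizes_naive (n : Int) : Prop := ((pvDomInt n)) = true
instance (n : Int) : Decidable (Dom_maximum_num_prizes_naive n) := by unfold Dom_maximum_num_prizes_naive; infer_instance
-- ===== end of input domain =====

-- B replaces A's O(n) loop with repeated sum()/list scans by an O(sqrt(n)) triangular-number
-- search plus a closed-form tail element (objective: faster).

-- ===== PORT A =====
def maximum_num_prizes_naive (n : Int) : List Int :=
  (PySem.List.pyRange 1 (n + 1) 1).foldl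
    (fun summands i =>
      let s := summands ++ [i]
      let remaining := n - s.sum
      if s.sum > n ∨ remaining ∈ s then summands else s)
    []

-- ===== PORT B =====
-- the 'while total + k + 1 <= n' loop of Source B (dependent if only as totality guard)
def pvAltLoop (n total : Int) (k : Nat) : Nat :=
  if h : total + (k : Int) + 1 ≤ n then pvAltLoop n (total + (k : Int) + 1) (k + 1) else k
termination_by (n - total).toNat
decreasing_by omega

def maximum_num_prizes_naive_alt (n : Int) : List Int :=
  let k := pvAltLoop n 0 0
  if k = 0 then []
  else PySem.List.pyRange 1 (k : Int) 1 ++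
    [n - PySem.Int.floordiv ((k : Int) * ((k : Int) - 1)) 2]

-- ===== PRECONDITION & SPEC =====
def Spec_maximum_num_prizes_naive (n : Int) (out : List Int) : Prop := out = maximum_num_prizes_naive_alt n
instance (n : Int) (out : List Int) : Decidable (Spec_maximum_num_prizes_naive n out) := by unfold Spec_maximum_num_prizes_naive; infer_instance

-- ===== CLAIM (what is proved, stated in full; the proofs are below) =====
def Claim_equal_maximum_num_prizes_naive : Prop := ∀ (n : Int), Dom_maximum_num_prizes_naive n → Spec_maximum_num_prizes_naive n (maximum_num_prizes_naive n)

-- ===== LEMMAS AND PROOFS =====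

-- triangular numbers 0, 1, 3, 6, …
def pvTri : Nat → Int
  | 0 => 0
  | k + 1 => pvTri k + ((k : Int) + 1)

lemma pvTri_succ (k : Nat) : pvTri (k + 1) = pvTri k + ((k : Int) + 1) := rfl

lemma pvTri_ge (k : Nat) : (k : Int) ≤ pvTri k := by
  induction k with
  | zero => simp [pvTri]
  | succ k ih => rw [pvTri_succ]; push_cast; omega

lemma pvTri_le_pvTri {a b : Nat} (h : a ≤ b) : pvTri a ≤ pvTri b := by
  induction b with
  | zero => have : a = 0 := by omega
            simp [this]
  | succ b ih =>
    rcases Nat.lt_or_ge a (b + 1) with h' | h'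
    · have h1 := ih (by omega)
      have h2 := pvTri_ge b
      rw [pvTri_succ]; omega
    · have : a = b + 1 := by omega
      subst this; exact le_refl _

lemma pvTwoMulTri (k : Nat) : 2 * pvTri k = (k : Int) * ((k : Int) + 1) := by
  induction k with
  | zero => simp [pvTri]
  | succ k ih => rw [pvTri_succ]; push_cast; ring_nf; push_cast at ih; linarith

-- the Int list [1, 2, …, m]
def pvRange1 (m : Nat) : List Int := PySem.List.pyRange 1 ((m : Int) + 1) 1

lemma pvRange1_zero : pvRange1 0 = [] := by decide

lemma pvRange1_succ (m : Nat) : pvRange1 (m + 1) = pvRange1 m ++ [(m : Int) + 1] := by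
  unfold pvRange1
  push_cast
  exact PySem.List.pyRange_one_succ_right (by omega)

lemma mem_pvRange1 {x : Int} {m : Nat} : x ∈ pvRange1 m ↔ 1 ≤ x ∧ x ≤ (m : Int) := by
  unfold pvRange1; rw [PySem.List.mem_pyRange_one]; omega

lemma sum_pvRange1 (m : Nat) : (pvRange1 m).sum = pvTri m := by
  induction m with
  | zero => simp [pvRange1_zero, pvTri]
  | succ m ih => rw [pvRange1_succ, List.sum_append, ih, pvTri_succ]; simp

-- A's loop body, named (definitionally equal to the lambda in the port)
def pvAstep (n : Int) (summands : List Int) (i : Int) : List Int :=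
  if (summands ++ [i]).sum > n ∨ (n - (summands ++ [i]).sum) ∈ (summands ++ [i]) then summands
  else summands ++ [i]

def pvAstate (n : Int) (m : Nat) : List Int := (pvRange1 m).foldl (pvAstep n) []

lemma pvAstate_succ (n : Int) (m : Nat) :
    pvAstate n (m + 1) = pvAstep n (pvAstate n m) ((m : Int) + 1) := by
  unfold pvAstate
  rw [pvRange1_succ, List.foldl_append]
  rfl

-- the invariant of A's loop, phrased against the triangular-number characterisation
lemma pvAstate_inv (n : Int) (J : Nat) (hJ1 : pvTri (J + 1) ≤ n) (hJ2 : n < pvTri (J + 2)) :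
    ∀ m : Nat, (m : Int) ≤ n →
      pvAstate n m =
        (if m ≤ J then pvRange1 m
         else if n - pvTri J = (J : Int) + 1 then pvRange1 (J + 1)
         else if (m : Int) < n - pvTri J then pvRange1 J
         else pvRange1 J ++ [n - pvTri J]) := by
  have htJ1 : pvTri (J + 1) = pvTri J + ((J : Int) + 1) := pvTri_succ J
  have htJ2 : pvTri (J + 2) = pvTri (J + 1) + ((J : Int) + 2) := by
    rw [pvTri_succ (J + 1)]; push_cast; ring
  intro m
  induction m with
  | zero =>
    intro _
    rw [if_pos (Nat.zero_le J)]
    simp [pvAstate, pvRange1_zero]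
  | succ m ih =>
    intro hm
    rw [pvAstate_succ, ih (by omega),
      show ((m + 1 : Nat) : Int) = (m : Int) + 1 from by push_cast; ring]
    push_cast at hm
    rcases Nat.lt_or_ge m J with hmJ | hmJ
    · -- m + 1 ≤ J : keep growing
      rw [if_pos (by omega : m ≤ J), if_pos (by omega : m + 1 ≤ J)]
      have hmono : pvTri (m + 2) ≤ pvTri (J + 1) := pvTri_le_pvTri (by omega)
      have htm1 : pvTri (m + 1) = pvTri m + ((m : Int) + 1) := pvTri_succ m
      have htm2 : pvTri (m + 2) = pvTri (m + 1) + ((m : Int) + 2) := by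
        rw [pvTri_succ (m + 1)]; push_cast; ring
      unfold pvAstep
      simp only [List.sum_append, sum_pvRange1, List.sum_cons, List.sum_nil,
        List.mem_append, List.mem_singleton, mem_pvRange1]
      rw [if_neg (by omega)]
      exact (pvRange1_succ m).symm
    · rcases Nat.lt_or_ge m (J + 1) with hmJ' | hmJ'
      · -- m = J : the pivotal step
        have hmeq : m = J := by omega
        subst hmeq
        rw [if_pos (le_refl m), if_neg (by omega : ¬ m + 1 ≤ m)]
        unfold pvAstep
        simp only [List.sum_append, sum_pvRange1, List.sum_cons, List.sum_nil,
          List.mem_append, List.mem_singleton, mem_pvRange1]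
        by_cases hr : n - pvTri m = (m : Int) + 1
        · rw [if_pos hr, if_neg (by omega)]
          exact (pvRange1_succ m).symm
        · rw [if_neg hr, if_pos (by omega), if_pos (by omega)]
      · -- m ≥ J + 1 : past the pivot
        rw [if_neg (by omega : ¬ m ≤ J), if_neg (by omega : ¬ m + 1 ≤ J)]
        by_cases hr : n - pvTri J = (J : Int) + 1
        · rw [if_pos hr, if_pos hr]
          unfold pvAstep
          simp only [List.sum_append, sum_pvRange1, List.sum_cons, List.sum_nil,
            List.mem_append, List.mem_singleton, mem_pvRange1]
          rw [if_pos (by omega)]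
        · rw [if_neg hr, if_neg hr]
          have hrlo : (J : Int) + 2 ≤ n - pvTri J := by omega
          have hrhi : n - pvTri J ≤ 2 * (J : Int) + 2 := by omega
          by_cases hlt : ((m : Int) + 1 < n - pvTri J)
          · -- still waiting for r : the tentative append is popped again
            rw [if_pos (by omega : (m : Int) < n - pvTri J), if_pos hlt]
            unfold pvAstep
            simp only [List.sum_append, sum_pvRange1, List.sum_cons, List.sum_nil,
              List.mem_append, List.mem_singleton, mem_pvRange1]
            rw [if_pos (by omega)]
          · by_cases heq : ((m : Int) + 1 = n - pvTri J)
            · -- i = r : the final summand is kept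
              rw [if_pos (by omega : (m : Int) < n - pvTri J), if_neg (by omega)]
              unfold pvAstep
              simp only [List.sum_append, sum_pvRange1, List.sum_cons, List.sum_nil,
                List.mem_append, List.mem_singleton, mem_pvRange1]
              rw [if_neg (by omega), heq]
            · -- i > r : the list is complete, every further append is popped
              rw [if_neg (by omega), if_neg (by omega)]
              unfold pvAstep
              simp only [List.sum_append, sum_pvRange1, List.sum_cons, List.sum_nil,
                List.mem_append, List.mem_singleton, mem_pvRange1]
              rw [if_pos (by omega)]

lemma pvA_eq_state (n : Int) (hn : 0 ≤ n) :
    maximum_num_prizes_naive n = pvAstate n n.toNat := by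
  unfold maximum_num_prizes_naive pvAstate pvRange1
  rw [show n + 1 = ((n.toNat : Int) + 1) from by omega]
  rfl

-- the while loop of B finds the largest K with pvTri K ≤ n (starting from a valid k)
lemma pvAltLoop_spec : ∀ (d : Nat) (n : Int) (k : Nat), (n - pvTri k).toNat ≤ d → pvTri k ≤ n →
    pvTri (pvAltLoop n (pvTri k) k) ≤ n ∧
    n < pvTri (pvAltLoop n (pvTri k) k) + (pvAltLoop n (pvTri k) k : Int) + 1 ∧
    k ≤ pvAltLoop n (pvTri k) k := by
  intro d
  induction d with
  | zero =>
    intro n k hd hk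
    rw [pvAltLoop, dif_neg (by omega)]
    exact ⟨hk, by omega, le_refl k⟩
  | succ d ih =>
    intro n k hd hk
    rw [pvAltLoop]
    by_cases h : pvTri k + (k : Int) + 1 ≤ n
    · rw [dif_pos h]
      have hstep : pvTri k + (k : Int) + 1 = pvTri (k + 1) := by rw [pvTri_succ]; ring
      rw [hstep]
      have hk1 : pvTri (k + 1) ≤ n := by omega
      have hd1 : (n - pvTri (k + 1)).toNat ≤ d := by rw [← hstep]; omega
      obtain ⟨a, b, c⟩ := ih n (k + 1) hd1 hk1
      exact ⟨a, b, by omega⟩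
    · rw [dif_neg h]
      exact ⟨hk, by omega, le_refl k⟩

lemma pvPyRange_nil {a b : Int} (h : b ≤ a) : PySem.List.pyRange a b 1 = [] := by
  rw [List.eq_nil_iff_forall_not_mem]
  intro x hx
  rw [PySem.List.mem_pyRange_one] at hx
  omega

-- ===== VERDICT (by name: the statement is the Claim_ definition above) =====
theorem maximum_num_prizes_naive_spec : Claim_equal_maximum_num_prizes_naive := by
  intro n _
  unfold Spec_maximum_num_prizes_naive
  by_cases hn : n ≤ 0
  · -- both sides return []
    have hK0 : pvAltLoop n 0 0 = 0 := by
      rw [pvAltLoop, dif_neg (by push_cast; omega)]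
    unfold maximum_num_prizes_naive
    simp only [maximum_num_prizes_naive_alt, hK0]
    rw [pvPyRange_nil (by omega)]
    simp
  · -- n ≥ 1
    have h0 : (0 : Int) ≤ n := by omega
    have hspec := pvAltLoop_spec (n - pvTri 0).toNat n 0 (le_refl _)
      (by simp [pvTri]; omega)
    have hKpos : 1 ≤ pvAltLoop n (pvTri 0) 0 := by
      rcases Nat.eq_zero_or_pos (pvAltLoop n (pvTri 0) 0) with h | h
      · rw [h] at hspec
        simp [pvTri] at hspec
        omega
      · omega
    obtain ⟨J, hJK⟩ : ∃ J, pvAltLoop n (pvTri 0) 0 = J + 1 :=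
      ⟨pvAltLoop n (pvTri 0) 0 - 1, by omega⟩
    rw [hJK] at hspec
    obtain ⟨htJ1, hK2, -⟩ := hspec
    have htJ2 : n < pvTri (J + 2) := by
      rw [pvTri_succ (J + 1)]
      push_cast at hK2 ⊢
      omega
    -- A's value
    have hA : maximum_num_prizes_naive n = pvRange1 J ++ [n - pvTri J] := by
      rw [pvA_eq_state n h0, pvAstate_inv n J htJ1 htJ2 n.toNat (by omega)]
      have hnJ : ¬ (n.toNat ≤ J) := by
        have h1 := pvTri_ge (J + 1)
        have h2 := pvTri_succ J
        push_cast at h1 h2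
        omega
      rw [if_neg hnJ]
      by_cases hr : n - pvTri J = (J : Int) + 1
      · rw [if_pos hr, pvRange1_succ, hr]
      · rw [if_neg hr, if_neg (by have := pvTri_ge J; omega)]
    -- B's value
    have hB : maximum_num_prizes_naive_alt n = pvRange1 J ++ [n - pvTri J] := by
      have hJK' : pvAltLoop n 0 0 = J + 1 := hJK
      simp only [maximum_num_prizes_naive_alt, hJK']
      rw [if_neg (by omega : ¬ (J + 1 = 0))]
      have hrange : PySem.List.pyRange 1 ((J + 1 : Nat) : Int) 1 = pvRange1 J := by
        unfold pvRange1; norm_cast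
      have hprod : ((J + 1 : Nat) : Int) * (((J + 1 : Nat) : Int) - 1) = 2 * pvTri J := by
        rw [pvTwoMulTri J]; push_cast; ring
      have hdiv : PySem.Int.floordiv (((J + 1 : Nat) : Int) * (((J + 1 : Nat) : Int) - 1)) 2
          = pvTri J := by
        rw [PySem.Int.floordiv_eq_iff_of_pos (by norm_num)]
        omega
      rw [hrange, hdiv]
    rw [hA, hB]
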